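-- pv_equiv track=rewrite | github.com/mucsci-students/2023sp-420-PyGame | MVC/Model/model_hints.py | generateTwoLetterDictionary
-- ===== SOURCE A (Python) =====
-- from collections import OrderedDict
--
-- def generateTwoLetterDictionary(words):
--     #words = puzzle.current_word_list
--     twoLetterDictionary = {}
--     for word in words:
--         twoLetters = word[0:2]
--         if twoLetters not in twoLetterDictionary:
--             twoLetterDictionary[twoLetters] = 0
--         twoLetterDictionary[twoLetters] += 1
--     #twoLetterDictionary = sorted(twoLetterDictionary)
--     dict1 = OrderedDict(sorted(twoLetterDictionary.items()))
--     return dict1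
-- ===== SOURCE B (Python) =====
-- from collections import OrderedDict
-- from itertools import groupby
--
-- def generateTwoLetterDictionary(words):
--     prefixes = sorted(word[0:2] for word in words)
--     return OrderedDict((k, sum(1 for _ in g)) for k, g in groupby(prefixes))
-- ===== Notes on version B (the rewrite author's own statement) =====
-- stated objective: alternative
-- what changed: Replaces the hash-map counting loop followed by sorting the (key,count) items with sort-the-raw-prefixes-then-groupby: build the list of two-letter prefixes, sort it, and count consecutive equal runs with itertools.groupby into an OrderedDict.
import Mathlib
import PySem

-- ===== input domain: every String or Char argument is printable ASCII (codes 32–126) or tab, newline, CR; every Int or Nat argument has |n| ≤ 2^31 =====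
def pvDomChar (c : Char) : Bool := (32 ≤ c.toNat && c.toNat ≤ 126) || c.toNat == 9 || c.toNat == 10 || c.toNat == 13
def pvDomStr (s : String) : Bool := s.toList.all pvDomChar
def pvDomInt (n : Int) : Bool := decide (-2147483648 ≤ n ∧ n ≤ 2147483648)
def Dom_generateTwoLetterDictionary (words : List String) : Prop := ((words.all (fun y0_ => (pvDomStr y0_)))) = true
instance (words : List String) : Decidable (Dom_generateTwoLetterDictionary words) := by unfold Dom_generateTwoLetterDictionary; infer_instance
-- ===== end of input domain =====

-- B replaces A's hash-map counting loop + sort-of-items with sort-the-prefixes-then-group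
-- consecutive runs (itertools.groupby); same result, a differently shaped pass (objective: alternative).

-- ===== PORT A =====
-- literal port of A: count prefixes in a dict, then sorted(dict.items()) with Python's
-- tuple comparison (lexicographic = toLex on String × Int)
def generateTwoLetterDictionary (words : List String) : List (String × Int) :=
  let d := words.foldl (fun d word =>
    let twoLetters := PySem.Str.slice word (some 0) (some 2)
    let d := if d.contains twoLetters then d else d.insert twoLetters 0
    d.insert twoLetters (d.getD twoLetters 0 + 1)) PySem.Dict.empty
  PySem.List.sorted d.items (fun p => toLex p)

-- ===== PORT B =====
-- groupby over a sorted list: each run of consecutive equal prefixes becomes one (key, run length) pair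
def pvGroupRuns : List String → List (String × Int)
  | [] => []
  | x :: xs =>
      (x, 1 + ((xs.takeWhile (· == x)).length : Int)) :: pvGroupRuns (xs.dropWhile (· == x))
  termination_by l => l.length
  decreasing_by
    simpa using Nat.lt_succ_of_le (List.length_dropWhile_le _ _)

def generateTwoLetterDictionary_alt (words : List String) : List (String × Int) :=
  pvGroupRuns (PySem.List.sorted (words.map (fun word => PySem.Str.slice word (some 0) (some 2))) id)

-- ===== PRECONDITION & SPEC =====
def Spec_generateTwoLetterDictionary (words : List String) (out : List (String × Int)) : Prop := out = generateTwoLetterDictionary_alt words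
instance (words : List String) (out : List (String × Int)) : Decidable (Spec_generateTwoLetterDictionary words out) := by unfold Spec_generateTwoLetterDictionary; infer_instance

-- ===== CLAIM (what is proved, stated in full; the proofs are below) =====
def Claim_equal_generateTwoLetterDictionary : Prop := ∀ (words : List String), Dom_generateTwoLetterDictionary words → Spec_generateTwoLetterDictionary words (generateTwoLetterDictionary words)

-- ===== LEMMAS AND PROOFS =====

-- in a ≤-sorted list, everything after the initial run of x is strictly greater than x
theorem pv_dropWhile_gt (x : String) (xs : List String)
    (h : (x :: xs).Pairwise (· ≤ ·)) :
    ∀ y ∈ xs.dropWhile (· == x), x < y := by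
  intro y hy
  have hxs : ∀ y ∈ xs, x ≤ y := (List.pairwise_cons.mp h).1
  have hd : (xs.dropWhile (· == x)).Pairwise (· ≤ ·) :=
    List.Pairwise.sublist (List.dropWhile_sublist _) (List.pairwise_cons.mp h).2
  cases hdw : xs.dropWhile (· == x) with
  | nil => simp [hdw] at hy
  | cons h0 t =>
      have hne0 : xs.dropWhile (· == x) ≠ [] := by simp [hdw]
      have hh0ne : ((xs.dropWhile (· == x)).head hne0 == x) = false :=
        List.head_dropWhile_not (· == x) hne0
      have hh0x : h0 ≠ x := by
        have : (xs.dropWhile (· == x)).head hne0 = h0 := by simp [hdw]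
        rw [this] at hh0ne
        exact ne_of_beq_false hh0ne
      have hh0 : x < h0 := by
        have hmemd : h0 ∈ xs.dropWhile (· == x) := by rw [hdw]; exact List.mem_cons_self
        have hmem : h0 ∈ xs := (List.dropWhile_sublist _).subset hmemd
        exact lt_of_le_of_ne (hxs h0 hmem) (Ne.symm hh0x)
      rw [hdw] at hy hd
      rcases List.mem_cons.mp hy with rfl | hyt
      · exact hh0
      · exact lt_of_lt_of_le hh0 ((List.pairwise_cons.mp hd).1 y hyt)

-- membership in pvGroupRuns of a ≤-sorted list: exactly the elements with their counts
theorem pv_mem_groupRuns (l : List String) (h : l.Pairwise (· ≤ ·)) (p : String × Int) :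
    p ∈ pvGroupRuns l ↔ (p.1 ∈ l ∧ p.2 = (l.count p.1 : Int)) := by
  induction l using pvGroupRuns.induct with
  | case1 => simp [pvGroupRuns]
  | case2 x xs ih =>
      have hgt := pv_dropWhile_gt x xs h
      have hd : (xs.dropWhile (· == x)).Pairwise (· ≤ ·) :=
        List.Pairwise.sublist (List.dropWhile_sublist _) (List.pairwise_cons.mp h).2
      have htw : ∀ y ∈ xs.takeWhile (· == x), y = x := by
        intro y hy
        simpa using List.mem_takeWhile_imp hy
      have hsplit : xs = xs.takeWhile (· == x) ++ xs.dropWhile (· == x) :=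
        (List.takeWhile_append_dropWhile).symm
      have hxd : x ∉ xs.dropWhile (· == x) := fun hx => lt_irrefl x (hgt x hx)
      have hcxs : xs.count x = (xs.takeWhile (· == x)).length := by
        conv_lhs => rw [hsplit]
        rw [List.count_append,
          List.count_eq_length.mpr (fun y hy => (htw y hy).symm),
          List.count_eq_zero.mpr hxd]
        omega
      have hcountx : ((x :: xs).count x : Int) = 1 + ((xs.takeWhile (· == x)).length : Int) := by
        rw [List.count_cons_self, hcxs]; push_cast; ring
      constructor
      · intro hp
        rw [pvGroupRuns] at hp
        rcases List.mem_cons.mp hp with rfl | hp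
        · exact ⟨by simp, by simpa using hcountx.symm⟩
        · obtain ⟨hp1, hp2⟩ := (ih hd).mp hp
          have hne : p.1 ≠ x := fun he => lt_irrefl x (he ▸ hgt p.1 hp1)
          refine ⟨List.mem_cons_of_mem _ ((List.dropWhile_sublist _).subset hp1), ?_⟩
          rw [hp2]
          congr 1
          rw [List.count_cons_of_ne (Ne.symm hne)]
          conv_rhs => rw [hsplit]
          rw [List.count_append,
            List.count_eq_zero.mpr (fun hx => hne (htw _ hx)), Nat.zero_add]
      · rintro ⟨hp1, hp2⟩
        rw [pvGroupRuns]
        obtain ⟨a, b⟩ := p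
        simp only at hp1 hp2
        by_cases he : a = x
        · subst he
          rw [hp2, hcountx]
          exact List.mem_cons_self
        · right
          have hpxs : a ∈ xs := by
            rcases List.mem_cons.mp hp1 with h' | h'
            · exact absurd h' he
            · exact h'
          have hpd : a ∈ xs.dropWhile (· == x) := by
            rw [hsplit] at hpxs
            rcases List.mem_append.mp hpxs with h' | h'
            · exact absurd (htw _ h') he
            · exact h'
          refine (ih hd).mpr ⟨hpd, ?_⟩
          rw [hp2]
          rw [List.count_cons_of_ne (fun hxa => he hxa.symm)]
          conv_lhs => rw [hsplit]
          rw [List.count_append,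
            List.count_eq_zero.mpr (fun hx => he (htw _ hx)), Nat.zero_add]

-- pvGroupRuns of a ≤-sorted list is strictly increasing in the lexicographic pair order
theorem pv_groupRuns_pairwise (l : List String) (h : l.Pairwise (· ≤ ·)) :
    (pvGroupRuns l).Pairwise (fun a b => toLex a < toLex b) := by
  induction l using pvGroupRuns.induct with
  | case1 => simp [pvGroupRuns]
  | case2 x xs ih =>
      have hgt := pv_dropWhile_gt x xs h
      have hd : (xs.dropWhile (· == x)).Pairwise (· ≤ ·) :=
        List.Pairwise.sublist (List.dropWhile_sublist _) (List.pairwise_cons.mp h).2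
      rw [pvGroupRuns, List.pairwise_cons]
      refine ⟨?_, ih hd⟩
      intro q hq
      obtain ⟨hq1, _⟩ := (pv_mem_groupRuns _ hd q).mp hq
      exact Prod.Lex.left _ _ (hgt q.1 hq1)

-- A's per-word loop body equals the Counter step on the extracted prefix
theorem pv_fold_eq_counter (ws : List String) (pf : String → String) :
    ws.foldl (fun d word =>
      let twoLetters := pf word
      let d := if d.contains twoLetters then d else d.insert twoLetters 0
      d.insert twoLetters (d.getD twoLetters 0 + 1)) PySem.Dict.empty
      = PySem.Dict.counter (ws.map pf) := by
  rw [← PySem.Dict.foldl_insert_getD_add_one_eq_counter, List.foldl_map]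
  congr 1
  funext d word
  by_cases hc : d.contains (pf word)
  · simp [hc]
  · simp only [hc, Bool.false_eq_true, if_false]
    rw [PySem.Dict.getD_insert_self, PySem.Dict.insert_insert_self,
      PySem.Dict.getD_of_not_contains d 0 (by simpa using hc)]

-- ===== VERDICT (by name: the statement is the Claim_ definition above) =====
theorem generateTwoLetterDictionary_spec : Claim_equal_generateTwoLetterDictionary := by
  intro words _
  unfold Spec_generateTwoLetterDictionary generateTwoLetterDictionary generateTwoLetterDictionary_alt
  set pf : String → String := fun word => PySem.Str.slice word (some 0) (some 2) with hpf
  set P : List String := words.map pf with hP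
  set S : List String := PySem.List.sorted P id with hS
  simp only []
  rw [pv_fold_eq_counter words pf, PySem.Dict.items_counter]
  have hSperm : S.Perm P := PySem.List.sorted_perm P id false
  have hSsorted : S.Pairwise (· ≤ ·) := PySem.List.sorted_pairwise P id
  have hmem : ∀ p : String × Int,
      p ∈ pvGroupRuns S ↔ (p.1 ∈ P ∧ p.2 = (P.count p.1 : Int)) := by
    intro p
    rw [pv_mem_groupRuns S hSsorted p, hSperm.mem_iff, hSperm.count_eq]
  have hpair := pv_groupRuns_pairwise S hSsorted
  have hne : ∀ {a b : String × Int}, toLex a < toLex b → a ≠ b := by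
    intro a b hab he
    subst he
    exact lt_irrefl _ hab
  have hnodupG : (pvGroupRuns S).Nodup := List.Pairwise.imp hne hpair
  have hnodupL : ((PySem.Set.ofList P).map
      (fun k => (k, (P.count k : Int))) : List (String × Int)).Nodup :=
    List.Nodup.map (fun a b hab => congrArg Prod.fst hab) (PySem.Set.nodup_ofList P)
  have hperm : (pvGroupRuns S).Perm
      ((PySem.Set.ofList P).map (fun k => (k, (P.count k : Int)))) := by
    rw [List.perm_ext_iff_of_nodup hnodupG hnodupL]
    intro p
    rw [hmem p]
    constructor
    · rintro ⟨h1, h2⟩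
      refine List.mem_map.mpr ⟨p.1, (PySem.Set.mem_ofList P p.1).mpr h1, ?_⟩
      obtain ⟨a, b⟩ := p
      simp only at h2
      rw [h2]
    · intro hp
      obtain ⟨k, hk, rfl⟩ := List.mem_map.mp hp
      exact ⟨(PySem.Set.mem_ofList P k).mp hk, rfl⟩
  exact PySem.List.sorted_eq_of_perm_of_pairwise_lt _ _ _ hperm hpair
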